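-- pv_equiv track=rewrite | github.com/cdli-ai/durak | python/durak/syllabification.py | _restore_case
-- ===== SOURCE A (Python) =====
-- from typing import List, Optional, Union
--
-- def _restore_case(syllables: List[str], original: str) -> List[str]:
--     """
--     Restore original casing to syllables.
--
--     Args:
--         syllables: Lowercase syllables
--         original: Original word with casing
--
--     Returns:
--         Syllables with restored casing
--     """
--     result = []
--     char_index = 0
--
--     for syllable in syllables:
--         restored = ""
--         for char in syllable:
--             if char_index < len(original):
--                 # Copy case from original
--                 if original[char_index].isupper():
--                     restored += char.upper()
--                 else:
--                     restored += char
--                 char_index += 1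
--             else:
--                 restored += char
--         result.append(restored)
--
--     return result
-- ===== SOURCE B (Python) =====
-- from typing import List
--
--
-- def _restore_case(syllables: List[str], original: str) -> List[str]:
--     # flatten -> single case-restoring map pass -> repartition by syllable lengths
--     flat = "".join(syllables)
--     restored = "".join(
--         ch.upper() if i < len(original) and original[i].isupper() else ch
--         for i, ch in enumerate(flat)
--     )
--     out = []
--     pos = 0
--     for s in syllables:
--         n = len(s)
--         out.append(restored[pos:pos + n])
--         pos += n
--     return out
-- ===== Notes on version B (the rewrite author's own statement) =====
-- stated objective: alternative
-- what changed: Replaced the interleaved global-index loop (per-syllable inner loop sharing a mutable char_index) by a flatten/map/partition decomposition: join all syllables, restore case position-wise in one map over the flat string, then slice it back into chunks of the original syllable lengths.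
import Mathlib
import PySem

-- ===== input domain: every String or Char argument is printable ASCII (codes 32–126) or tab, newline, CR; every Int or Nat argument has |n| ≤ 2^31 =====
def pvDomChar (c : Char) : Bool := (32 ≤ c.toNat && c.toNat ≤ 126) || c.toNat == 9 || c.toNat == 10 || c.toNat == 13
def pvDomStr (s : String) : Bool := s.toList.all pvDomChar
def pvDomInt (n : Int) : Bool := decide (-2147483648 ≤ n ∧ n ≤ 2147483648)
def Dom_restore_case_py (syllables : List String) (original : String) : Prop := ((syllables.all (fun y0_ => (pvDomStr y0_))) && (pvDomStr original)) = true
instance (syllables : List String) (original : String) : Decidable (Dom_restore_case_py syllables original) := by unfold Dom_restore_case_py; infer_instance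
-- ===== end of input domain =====

-- B changes the decomposition: flatten all syllables, restore case in one map pass, repartition by lengths (objective: alternative).

-- ===== PORT A =====
-- interleaved loop: outer fold over syllables, inner fold over chars sharing the mutable char_index
def restore_case_py (syllables : List String) (original : String) : List String :=
  (syllables.foldl (fun (st : List String × Nat) syl =>
      let inner := syl.toList.foldl (fun (q : List Char × Nat) c =>
        if q.2 < original.toList.length then
          (q.1 ++ [if PySem.Chars.isupper (original.toList.getD q.2 c) then PySem.Chars.upperChar c else c], q.2 + 1)
        else (q.1 ++ [c], q.2)) ([], st.2)
      (st.1 ++ [String.ofList inner.1], inner.2)) ([], 0)).1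

-- ===== PORT B =====
-- repartition pass of Source B: out.append(restored[pos:pos+n]); pos += n
def restoreReChunk (restored : List Char) (pos : Nat) : List String → List String
  | [] => []
  | s :: ss =>
      String.ofList (PySem.List.slice restored (some (pos : Int)) (some ((pos + s.toList.length : Nat) : Int)))
        :: restoreReChunk restored (pos + s.toList.length) ss

def restore_case_py_alt (syllables : List String) (original : String) : List String :=
  let orig := original.toList
  let flat := (syllables.map String.toList).flatten
  let restored := (PySem.List.enumerate flat 0).map (fun p =>
    if p.1 < (orig.length : Int) && PySem.Chars.isupper (orig.getD p.1.toNat p.2)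
    then PySem.Chars.upperChar p.2 else p.2)
  restoreReChunk restored 0 syllables

-- ===== PRECONDITION & SPEC =====
def Spec_restore_case_py (syllables : List String) (original : String) (out : List String) : Prop := out = restore_case_py_alt syllables original
instance (syllables : List String) (original : String) (out : List String) : Decidable (Spec_restore_case_py syllables original out) := by unfold Spec_restore_case_py; infer_instance

-- ===== CLAIM (what is proved, stated in full; the proofs are below) =====
def Claim_equal_restore_case_py : Prop := ∀ (syllables : List String) (original : String), Dom_restore_case_py syllables original → Spec_restore_case_py syllables original (restore_case_py syllables original)

-- ===== LEMMAS AND PROOFS =====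

-- the position-wise case transformation, as a structural recursion with an explicit offset
def rcMap (orig : List Char) : Nat → List Char → List Char
  | _, [] => []
  | p, c :: cs =>
      (if decide (p < orig.length) && PySem.Chars.isupper (orig.getD p c)
       then PySem.Chars.upperChar c else c) :: rcMap orig (p + 1) cs

-- the common intermediate: chunk k = rcMap applied to syllable k at its global offset
def rcChunks (orig : List Char) : List String → Nat → List String
  | [], _ => []
  | s :: ss, p => String.ofList (rcMap orig p s.toList) :: rcChunks orig ss (p + s.toList.length)

theorem rcMap_length (orig : List Char) : ∀ (p : Nat) (l : List Char), (rcMap orig p l).length = l.length := by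
  intro p l
  induction l generalizing p with
  | nil => rfl
  | cons c cs ih => simp [rcMap, ih]

theorem rcMap_append (orig : List Char) : ∀ (l1 l2 : List Char) (p : Nat),
    rcMap orig p (l1 ++ l2) = rcMap orig p l1 ++ rcMap orig (p + l1.length) l2 := by
  intro l1
  induction l1 with
  | nil => intro l2 p; simp [rcMap]
  | cons c cs ih =>
      intro l2 p
      simp [rcMap, ih, Nat.add_assoc, Nat.add_comm 1 cs.length]

-- A's inner loop from a saturated index min p L computes rcMap at true offset p
theorem restoreA_inner (original : String) :
    ∀ (l : List Char) (p : Nat) (acc : List Char),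
      l.foldl (fun (q : List Char × Nat) c =>
        if q.2 < original.toList.length then
          (q.1 ++ [if PySem.Chars.isupper (original.toList.getD q.2 c) then PySem.Chars.upperChar c else c], q.2 + 1)
        else (q.1 ++ [c], q.2)) (acc, min p original.toList.length)
      = (acc ++ rcMap original.toList p l, min (p + l.length) original.toList.length) := by
  intro l
  induction l with
  | nil => intro p acc; simp [rcMap]
  | cons c cs ih =>
      intro p acc
      by_cases hp : p < original.toList.length
      · have hmin : min p original.toList.length = p := Nat.min_eq_left (Nat.le_of_lt hp)
        have hmin' : min (p + 1) original.toList.length = p + 1 := Nat.min_eq_left hp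
        have h2 := ih (p + 1) (acc ++ [if PySem.Chars.isupper (original.toList.getD p c) then PySem.Chars.upperChar c else c])
        rw [hmin'] at h2
        simp only [List.foldl_cons, hmin, if_pos hp, h2]
        have hp' : p < original.length := by simpa using hp
        simp [rcMap, hp', List.append_assoc, Nat.add_assoc, Nat.add_comm 1 cs.length]
      · have hge : original.toList.length ≤ p := Nat.le_of_not_lt hp
        have hmin : min p original.toList.length = original.toList.length := Nat.min_eq_right hge
        have hmin' : min (p + 1) original.toList.length = original.toList.length :=
          Nat.min_eq_right (Nat.le_succ_of_le hge)
        have hlt : ¬ (original.toList.length < original.toList.length) := lt_irrefl _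
        have h2 := ih (p + 1) (acc ++ [c])
        rw [hmin'] at h2
        simp only [List.foldl_cons, hmin, if_neg hlt, h2]
        have hp' : ¬ p < original.length := by simpa using hp
        simp [rcMap, hp', List.append_assoc, Nat.add_assoc, Nat.add_comm 1 cs.length]

-- A's outer loop produces the chunks of the common intermediate
theorem restoreA_outer (original : String) :
    ∀ (ss : List String) (p : Nat) (accS : List String),
      (ss.foldl (fun (st : List String × Nat) syl =>
        let inner := syl.toList.foldl (fun (q : List Char × Nat) c =>
          if q.2 < original.toList.length then
            (q.1 ++ [if PySem.Chars.isupper (original.toList.getD q.2 c) then PySem.Chars.upperChar c else c], q.2 + 1)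
          else (q.1 ++ [c], q.2)) ([], st.2)
        (st.1 ++ [String.ofList inner.1], inner.2)) (accS, min p original.toList.length)).1
      = accS ++ rcChunks original.toList ss p := by
  intro ss
  induction ss with
  | nil => intro p accS; simp [rcChunks]
  | cons s ss ih =>
      intro p accS
      simp only [List.foldl_cons]
      rw [restoreA_inner original s.toList p []]
      simpa [rcChunks, List.append_assoc] using ih (p + s.toList.length) (accS ++ [String.ofList (rcMap original.toList p s.toList)])

-- B's enumerate-map pass is rcMap
theorem restoreB_map (orig : List Char) :
    ∀ (xs : List Char) (s : Nat),
      (PySem.List.enumerate xs (s : Int)).map (fun p =>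
        if p.1 < (orig.length : Int) && PySem.Chars.isupper (orig.getD p.1.toNat p.2)
        then PySem.Chars.upperChar p.2 else p.2)
      = rcMap orig s xs := by
  intro xs
  induction xs with
  | nil => intro s; simp [PySem.List.enumerate_nil, rcMap]
  | cons c cs ih =>
      intro s
      rw [PySem.List.enumerate_cons]
      have : ((s : Int) + 1) = ((s + 1 : Nat) : Int) := by push_cast; ring
      simp only [List.map_cons, this, ih (s + 1), rcMap]
      congr 1
      by_cases h : s < orig.length <;> simp [h]

-- a positional slice [pos:pos+n] is take n of drop pos
theorem restoreReChunk_slice (restored : List Char) :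
    ∀ (ss : List String) (pos : Nat),
      restoreReChunk restored pos ss
        = match ss with
          | [] => []
          | s :: ss' => String.ofList ((restored.drop pos).take s.toList.length)
              :: restoreReChunk restored (pos + s.toList.length) ss' := by
  intro ss pos
  cases ss with
  | nil => rfl
  | cons s ss' =>
      simp only [restoreReChunk]
      rw [PySem.List.slice_toNat restored (by positivity) (by positivity)]
      simp only [Int.toNat_natCast]
      have h : (pos + s.toList.length) - pos = s.toList.length := by omega
      rw [h]

-- B's repartition of the mapped flat list recovers the chunks
theorem restoreB_chunks (orig : List Char) (restored : List Char) :
    ∀ (ss : List String) (p pos : Nat),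
      restored.drop pos = rcMap orig p ((ss.map String.toList).flatten) →
      restoreReChunk restored pos ss = rcChunks orig ss p := by
  intro ss
  induction ss with
  | nil => intro p pos _; simp [restoreReChunk, rcChunks]
  | cons s ss ih =>
      intro p pos hdrop
      rw [restoreReChunk_slice]
      simp only [List.map_cons, List.flatten_cons] at hdrop
      rw [rcMap_append] at hdrop
      have hlen : (rcMap orig p s.toList).length = s.toList.length := rcMap_length orig p s.toList
      simp only [rcChunks]
      rw [hdrop, List.take_left' hlen]
      congr 1
      apply ih (p + s.toList.length) (pos + s.toList.length)
      rw [← List.drop_drop, hdrop, List.drop_left' hlen]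

-- ===== VERDICT (by name: the statement is the Claim_ definition above) =====
theorem restore_case_py_spec : Claim_equal_restore_case_py := by
  intro syllables original _
  unfold Spec_restore_case_py
  simp only [restore_case_py, restore_case_py_alt]
  have hA := restoreA_outer original syllables 0 []
  simp only [Nat.zero_min] at hA
  rw [hA]
  have h0 : (0 : Int) = ((0 : Nat) : Int) := rfl
  rw [h0, restoreB_map original.toList,
    restoreB_chunks original.toList _ syllables 0 0 (by simp)]
  simp
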